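-- pv_equiv track=rewrite | github.com/JSarasua/AdventOfCode2021 | Source/Day3.py | FilterByBit
-- ===== SOURCE A (Python) =====
-- def GetFilteredBitAtDigitIndex(dataArr, filterDigit, useGreater):
--     bitCount = 0
--     lineCount = len(dataArr)
--     halfLineCount = lineCount/2
--     for fileLine in dataArr:
--         digitInt = int(fileLine[filterDigit])
--         bitCount += digitInt
--         currentIndx = 0
--
--     if useGreater:
--         if bitCount >= halfLineCount:
--             return 1
--         else:
--             return 0
--     else:
--         if bitCount >= halfLineCount:
--             return 0
--         else:
--             return 1
--
-- def FilterByBit(dataArr, filterDigit, isGreater):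
--     filterBit = GetFilteredBitAtDigitIndex(dataArr, filterDigit, isGreater)
--     filteredArray = []
--     for dataLine in dataArr:
--         leftBit = int(dataLine[filterDigit])
--         if leftBit == filterBit:
--             filteredArray.append(dataLine)
--
--     return filteredArray
-- ===== SOURCE B (Python) =====
-- def FilterByBit(dataArr, filterDigit, isGreater):
--     ones, zeros, total = [], [], 0
--     for dataLine in dataArr:
--         d = int(dataLine[filterDigit])
--         total += d
--         if d == 1:
--             ones.append(dataLine)
--         elif d == 0:
--             zeros.append(dataLine)
--     if isGreater:
--         filterBit = 1 if 2 * total >= len(dataArr) else 0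
--     else:
--         filterBit = 0 if 2 * total >= len(dataArr) else 1
--     return ones if filterBit == 1 else zeros
-- ===== Notes on version B (the rewrite author's own statement) =====
-- stated objective: simpler
-- what changed: Single pass that partitions lines into ones/zeros while summing the digits, then selects the right group, instead of a counting pass followed by a second filtering pass through a helper.
import Mathlib
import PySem

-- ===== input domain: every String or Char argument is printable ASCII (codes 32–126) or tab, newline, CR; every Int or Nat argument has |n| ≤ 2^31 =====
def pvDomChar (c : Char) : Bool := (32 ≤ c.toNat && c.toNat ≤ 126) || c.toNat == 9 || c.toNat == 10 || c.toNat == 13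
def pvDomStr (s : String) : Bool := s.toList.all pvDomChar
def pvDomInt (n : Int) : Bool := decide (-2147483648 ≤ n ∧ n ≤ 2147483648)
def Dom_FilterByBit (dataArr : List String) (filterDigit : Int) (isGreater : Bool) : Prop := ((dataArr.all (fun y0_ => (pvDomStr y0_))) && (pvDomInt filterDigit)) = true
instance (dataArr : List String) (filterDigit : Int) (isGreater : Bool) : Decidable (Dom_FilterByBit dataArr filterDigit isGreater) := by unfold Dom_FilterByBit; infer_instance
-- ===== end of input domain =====

-- B replaces A's count-pass + second filter-pass by one pass that partitions the lines
-- into ones/zeros while summing the digits, then selects the right group (objective: simpler).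


-- ===== PORT A =====
-- int(line[i]) (default 0 where Python raises; Pre_ excludes those inputs)
def pvDigitAt (s : String) (i : Int) : Int :=
  match PySem.Str.pyGet? s i with
  | some c => (PySem.Int.ofChars? [c]).getD 0
  | none => 0

-- 'bitCount >= halfLineCount' with halfLineCount = lineCount/2 (a Python float, exact here)
-- is ported as the exact integer comparison 2*bitCount >= lineCount.
def GetFilteredBitAtDigitIndex (dataArr : List String) (filterDigit : Int) (useGreater : Bool) : Int :=
  let bitCount := dataArr.foldl (fun acc fileLine => acc + pvDigitAt fileLine filterDigit) 0
  if useGreater then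
    if 2 * bitCount ≥ (dataArr.length : Int) then 1 else 0
  else
    if 2 * bitCount ≥ (dataArr.length : Int) then 0 else 1

def FilterByBit (dataArr : List String) (filterDigit : Int) (isGreater : Bool) : List String :=
  let filterBit := GetFilteredBitAtDigitIndex dataArr filterDigit isGreater
  dataArr.foldl
    (fun filteredArray dataLine =>
      if pvDigitAt dataLine filterDigit = filterBit then filteredArray ++ [dataLine]
      else filteredArray) []

-- ===== PORT B =====
def FilterByBit_alt (dataArr : List String) (filterDigit : Int) (isGreater : Bool) : List String :=
  let st := dataArr.foldl
    (fun (st : List String × List String × Int) dataLine =>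
      let d := pvDigitAt dataLine filterDigit
      let t := st.2.2 + d
      if d = 1 then (st.1 ++ [dataLine], st.2.1, t)
      else if d = 0 then (st.1, st.2.1 ++ [dataLine], t)
      else (st.1, st.2.1, t))
    ([], [], 0)
  let filterBit : Int :=
    if isGreater then (if 2 * st.2.2 ≥ (dataArr.length : Int) then 1 else 0)
    else (if 2 * st.2.2 ≥ (dataArr.length : Int) then 0 else 1)
  if filterBit = 1 then st.1 else st.2.1

-- ===== PRECONDITION & SPEC =====
-- Pre_ excludes exactly the inputs where Python A raises: an out-of-range index
-- (IndexError) or a non-digit character at that index (ValueError from int()).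
def Pre_FilterByBit (dataArr : List String) (filterDigit : Int) (isGreater : Bool) : Prop :=
  ∀ s ∈ dataArr, ((PySem.Str.pyGet? s filterDigit).map PySem.Chars.isdigit).getD false = true

instance (dataArr : List String) (filterDigit : Int) (isGreater : Bool) : Decidable (Pre_FilterByBit dataArr filterDigit isGreater) := by unfold Pre_FilterByBit; infer_instance

def pvWitness_FilterByBit : List String × Int × Bool := (["10", "01", "11"], 0, true)

def Spec_FilterByBit (dataArr : List String) (filterDigit : Int) (isGreater : Bool) (out : List String) : Prop := out = FilterByBit_alt dataArr filterDigit isGreater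
instance (dataArr : List String) (filterDigit : Int) (isGreater : Bool) (out : List String) : Decidable (Spec_FilterByBit dataArr filterDigit isGreater out) := by unfold Spec_FilterByBit; infer_instance

-- ===== CLAIM (what is proved, stated in full; the proofs are below) =====
def Claim_equal_FilterByBit : Prop := ∀ (dataArr : List String) (filterDigit : Int) (isGreater : Bool), Dom_FilterByBit dataArr filterDigit isGreater → Pre_FilterByBit dataArr filterDigit isGreater → Spec_FilterByBit dataArr filterDigit isGreater (FilterByBit dataArr filterDigit isGreater)

-- ===== LEMMAS AND PROOFS =====

-- B's partition fold, unrolled: first group = lines with digit 1, second = lines with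
-- digit 0, third = the digit sum (all relative to the initial state).
theorem pvPartition_spec (fd : Int) (dataArr : List String) :
    ∀ (o z : List String) (t : Int),
      dataArr.foldl
        (fun (st : List String × List String × Int) dataLine =>
          let d := pvDigitAt dataLine fd
          let t := st.2.2 + d
          if d = 1 then (st.1 ++ [dataLine], st.2.1, t)
          else if d = 0 then (st.1, st.2.1 ++ [dataLine], t)
          else (st.1, st.2.1, t))
        (o, z, t)
      = (o ++ dataArr.filter (fun l => pvDigitAt l fd = 1),
         z ++ dataArr.filter (fun l => pvDigitAt l fd = 0),
         t + (dataArr.map (fun l => pvDigitAt l fd)).sum) := by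
  induction dataArr with
  | nil => simp
  | cons x xs ih =>
    intro o z t
    simp only [List.foldl_cons, List.filter_cons, List.map_cons, List.sum_cons]
    by_cases h1 : pvDigitAt x fd = 1
    · simp [h1, ih, List.append_assoc, add_assoc]
    · by_cases h0 : pvDigitAt x fd = 0
      · simp [h1, h0, ih, List.append_assoc, add_assoc]
      · simp [h1, h0, ih, add_assoc]

-- under Pre_, every digit at the filter index is 0 or 1 ... not needed: B drops other
-- lines from both groups, and A keeps only lines equal to filterBit ∈ {0,1}.

theorem FilterByBit_eq_alt (dataArr : List String) (filterDigit : Int) (isGreater : Bool) :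
    FilterByBit dataArr filterDigit isGreater = FilterByBit_alt dataArr filterDigit isGreater := by
  unfold FilterByBit FilterByBit_alt GetFilteredBitAtDigitIndex
  rw [pvPartition_spec]
  simp only [List.nil_append, zero_add]
  have hsum : dataArr.foldl (fun acc fileLine => acc + pvDigitAt fileLine filterDigit) 0
      = (dataArr.map (fun l => pvDigitAt l filterDigit)).sum := by
    simpa using PySem.List.foldl_add (fun l => pvDigitAt l filterDigit) (a := 0) (l := dataArr)
  rw [hsum]
  by_cases hg : isGreater <;>
    by_cases hc : 2 * (dataArr.map (fun l => pvDigitAt l filterDigit)).sum ≥ (dataArr.length : Int) <;>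
      simp [hg, hc, PySem.List.foldl_append_ite_eq_filter]

-- ===== VERDICT (by name: the statement is the Claim_ definition above) =====
theorem FilterByBit_spec : Claim_equal_FilterByBit := by
  intro dataArr filterDigit isGreater _ _
  exact FilterByBit_eq_alt dataArr filterDigit isGreater
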